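-- pv_equiv track=rewrite | github.com/rabisankar21/python_project | progrms/number sum even product odd digits.py | sum_and_product_of_digits
-- ===== SOURCE A (Python) =====
-- def sum_and_product_of_digits(number):
--
--     sum_of_even = 0
--     product_of_odd = 1
--     while number > 0:
--         digit = number % 10
--         if digit % 2 == 0:
--             sum_of_even += digit
--         else:
--             product_of_odd *= digit
--         number //= 10
--
--     return sum_of_even, product_of_odd
-- ===== SOURCE B (Python) =====
-- def sum_and_product_of_digits(number):
--     # extract decimal digits from the string form (no digits for number <= 0)
--     digits = [ord(c) - 48 for c in str(number)] if number > 0 else []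
--     sum_of_even = sum(d for d in digits if d % 2 == 0)
--     product_of_odd = 1
--     for d in digits:
--         if d % 2 == 1:
--             product_of_odd *= d
--     return sum_of_even, product_of_odd
-- ===== Notes on version B (the rewrite author's own statement) =====
-- stated objective: alternative
-- what changed: Replaces the interleaved while-loop doing %10 and //=10 with digit extraction from the string representation followed by two separate aggregations (a filtered sum for even digits and a product fold for odd digits).
import Mathlib
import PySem

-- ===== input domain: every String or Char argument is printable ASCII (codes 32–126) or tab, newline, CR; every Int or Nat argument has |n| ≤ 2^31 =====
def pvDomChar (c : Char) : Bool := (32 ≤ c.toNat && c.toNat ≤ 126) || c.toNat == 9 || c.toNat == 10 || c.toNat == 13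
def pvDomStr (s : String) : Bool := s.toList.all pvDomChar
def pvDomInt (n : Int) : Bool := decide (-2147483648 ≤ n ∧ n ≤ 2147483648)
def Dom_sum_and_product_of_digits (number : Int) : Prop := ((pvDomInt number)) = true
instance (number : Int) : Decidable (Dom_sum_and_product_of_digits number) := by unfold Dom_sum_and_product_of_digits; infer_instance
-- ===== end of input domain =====

-- B swaps A's single interleaved %10//10 loop for digit extraction from str(number) plus two separate aggregations (alternative decomposition, same cost).

-- ===== PORT A =====
-- the while-loop of A, with Python's % and // on ints (PySem.Int.mod / floordiv)
def pvALoop (number sum_of_even product_of_odd : Int) : Int × Int :=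
  if _h : 0 < number then
    let digit := PySem.Int.mod number 10
    if PySem.Int.mod digit 2 == 0 then
      pvALoop (PySem.Int.floordiv number 10) (sum_of_even + digit) product_of_odd
    else
      pvALoop (PySem.Int.floordiv number 10) sum_of_even (product_of_odd * digit)
  else
    (sum_of_even, product_of_odd)
termination_by number.toNat
decreasing_by
  all_goals
    rw [PySem.Int.floordiv_eq_ediv_of_pos (by norm_num)]
    omega

def sum_and_product_of_digits (number : Int) : Int × Int :=
  pvALoop number 0 1

-- ===== PORT B =====
def sum_and_product_of_digits_alt (number : Int) : Int × Int :=
  let digits : List Int :=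
    if 0 < number then (PySem.Int.toStr number).toList.map (fun c => ((c.toNat : Int) - 48)) else []
  let sum_of_even := (digits.filter (fun d => PySem.Int.mod d 2 == 0)).foldl (· + ·) 0
  let product_of_odd := digits.foldl (fun p d => if PySem.Int.mod d 2 == 1 then p * d else p) 1
  (sum_of_even, product_of_odd)

-- ===== PRECONDITION & SPEC =====
def Spec_sum_and_product_of_digits (number : Int) (out : Int × Int) : Prop := out = sum_and_product_of_digits_alt number
instance (number : Int) (out : Int × Int) : Decidable (Spec_sum_and_product_of_digits number out) := by unfold Spec_sum_and_product_of_digits; infer_instance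

-- ===== CLAIM (what is proved, stated in full; the proofs are below) =====
def Claim_equal_sum_and_product_of_digits : Prop := ∀ (number : Int), Dom_sum_and_product_of_digits number → Spec_sum_and_product_of_digits number (sum_and_product_of_digits number)

-- ===== LEMMAS AND PROOFS =====

-- decimal digits of a natural number, least significant first, as integers
def pvDigits (m : Nat) : List Int := (Nat.digits 10 m).map (fun d : Nat => (d : Int))

lemma pvParity (d : Int) : (PySem.Int.mod d 2 == 1) = !(PySem.Int.mod d 2 == 0) := by
  rcases PySem.Int.mod_two_eq d with h | h <;> rw [h] <;> decide

lemma pvALoop_eq_aux (k : Nat) : ∀ n s p : Int, n.toNat = k →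
    pvALoop n s p =
      (s + ((pvDigits n.toNat).filter (fun d => PySem.Int.mod d 2 == 0)).sum,
       p * ((pvDigits n.toNat).filter (fun d => !(PySem.Int.mod d 2 == 0))).prod) := by
  induction k using Nat.strong_induction_on with
  | _ k ih =>
    intro n s p hk
    unfold pvALoop
    by_cases h : 0 < n
    · rw [dif_pos h]
      have hd : PySem.Int.mod n 10 = ((n.toNat % 10 : Nat) : Int) := by
        rw [PySem.Int.mod_eq_emod_of_pos (by norm_num)]; omega
      have hq : (PySem.Int.floordiv n 10).toNat = n.toNat / 10 := by
        rw [PySem.Int.floordiv_eq_ediv_of_pos (by norm_num)]; omega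
      have hdig : Nat.digits 10 n.toNat = (n.toNat % 10) :: Nat.digits 10 (n.toNat / 10) :=
        Nat.digits_def' (by norm_num) (by omega)
      have hlt : n.toNat / 10 < k := by omega
      simp only [hd]
      by_cases hb : (PySem.Int.mod ((n.toNat % 10 : Nat) : Int) 2 == 0) = true
      · rw [if_pos hb, ih (n.toNat / 10) hlt _ _ _ hq, hq]
        simp only [pvDigits, hdig, List.map_cons, List.filter_cons, hb, Bool.not_true,
          Bool.false_eq_true, List.sum_cons, ite_true, ite_false]
        rw [Prod.mk.injEq]
        exact ⟨by ring, rfl⟩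
      · rw [if_neg hb, ih (n.toNat / 10) hlt _ _ _ hq, hq]
        have hb0 : (PySem.Int.mod ((n.toNat % 10 : Nat) : Int) 2 == 0) = false := by
          simpa using hb
        simp only [pvDigits, hdig, List.map_cons, List.filter_cons, hb0, Bool.not_false,
          Bool.false_eq_true, List.prod_cons, ite_true, ite_false]
        rw [Prod.mk.injEq]
        exact ⟨rfl, by ring⟩
    · rw [dif_neg h]
      have h0 : n.toNat = 0 := by omega
      simp [pvDigits, h0]

lemma pvALoop_eq (n s p : Int) :
    pvALoop n s p =
      (s + ((pvDigits n.toNat).filter (fun d => PySem.Int.mod d 2 == 0)).sum,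
       p * ((pvDigits n.toNat).filter (fun d => !(PySem.Int.mod d 2 == 0))).prod) :=
  pvALoop_eq_aux n.toNat n s p rfl

lemma pvDigitChar_toNat (d : Nat) (h : d < 10) :
    (((Nat.digitChar d).toNat : Int) - 48) = (d : Int) := by
  interval_cases d <;> decide

lemma pvToDigitsCore_eq (fuel : Nat) : ∀ (n : Nat) (ds : List Char), 0 < n → n ≤ fuel →
    Nat.toDigitsCore 10 fuel n ds = ((Nat.digits 10 n).map Nat.digitChar).reverse ++ ds := by
  induction fuel with
  | zero => intro n ds h1 h2; omega
  | succ f ih =>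
    intro n ds h1 h2
    rw [Nat.toDigitsCore]
    rw [Nat.digits_def' (by norm_num : (1:Nat) < 10) h1]
    by_cases h : n / 10 = 0
    · rw [if_pos h, h]
      simp
    · rw [if_neg h]
      rw [ih (n / 10) _ (Nat.pos_of_ne_zero h) (by omega)]
      simp

lemma pvToChars_eq (n : Int) (h : 0 < n) :
    (PySem.Int.toStr n).toList.map (fun c => ((c.toNat : Int) - 48)) = (pvDigits n.toNat).reverse := by
  rw [PySem.Int.toList_toStr]
  unfold PySem.Int.toChars
  rw [if_neg (by omega)]
  unfold Nat.toDigits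
  rw [pvToDigitsCore_eq _ _ _ (by omega) (by omega)]
  rw [List.append_nil, List.map_reverse, List.map_map, pvDigits]
  congr 1
  apply List.map_congr_left
  intro d hd
  exact pvDigitChar_toNat d (Nat.digits_lt_base (by norm_num) hd)

lemma pvFoldlAdd (l : List Int) (a : Int) : l.foldl (· + ·) a = a + l.sum := by
  induction l generalizing a with
  | nil => simp
  | cons x xs ih => simp only [List.foldl_cons, List.sum_cons, ih]; ring

lemma pvFoldlProdIf (l : List Int) (a : Int) :
    l.foldl (fun p d => if PySem.Int.mod d 2 == 1 then p * d else p) a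
      = a * (l.filter (fun d => PySem.Int.mod d 2 == 1)).prod := by
  induction l generalizing a with
  | nil => simp
  | cons x xs ih =>
    simp only [List.foldl_cons, List.filter_cons]
    by_cases hb : (PySem.Int.mod x 2 == 1) = true
    · rw [if_pos hb, if_pos hb, ih, List.prod_cons]; ring
    · rw [if_neg hb, if_neg hb, ih]

-- ===== VERDICT (by name: the statement is the Claim_ definition above) =====
theorem sum_and_product_of_digits_spec : Claim_equal_sum_and_product_of_digits := by
  intro n _
  unfold Spec_sum_and_product_of_digits
  show sum_and_product_of_digits n = sum_and_product_of_digits_alt n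
  unfold sum_and_product_of_digits sum_and_product_of_digits_alt
  rw [pvALoop_eq]
  by_cases h : 0 < n
  · simp only [if_pos h, pvToChars_eq n h]
    rw [pvFoldlAdd, pvFoldlProdIf]
    simp only [pvParity, List.filter_reverse, List.sum_reverse, List.prod_reverse]
  · simp only [if_neg h]
    have h0 : n.toNat = 0 := by omega
    simp [pvDigits, h0]
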